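-- pv_equiv track=rewrite | github.com/Ezmeyer/C10T1---Integraci-n-de-Funciones-y-Arreglos-en-Soluciones-de-Problemas-Reales | Análisis de Temperaturas Mensuales.py | ciudad_mayor_variacion
-- ===== SOURCE A (Python) =====
-- def ciudad_mayor_variacion(temps):
--     mayor_variacion = -1
--     ciudad_variacion = -1
--
--     for i in range(len(temps)):
--         variacion = max(temps[i]) - min(temps[i])
--
--         if variacion > mayor_variacion:
--             mayor_variacion = variacion
--             ciudad_variacion = i
--
--     return ciudad_variacion, mayor_variacion
-- ===== SOURCE B (Python) =====
-- def ciudad_mayor_variacion(temps):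
--     if not temps:
--         return -1, -1
--
--     def mejor(lo, hi):
--         # best (index, range) over temps[lo:hi]; ties keep the leftmost index
--         if hi - lo == 1:
--             t = temps[lo]
--             return lo, max(t) - min(t)
--         mid = (lo + hi) // 2
--         i1, v1 = mejor(lo, mid)
--         i2, v2 = mejor(mid, hi)
--         if v1 >= v2:
--             return i1, v1
--         return i2, v2
--
--     return mejor(0, len(temps))
-- ===== Notes on version B (the rewrite author's own statement) =====
-- stated objective: alternative
-- what changed: Replaces A's single left-to-right loop carrying a running (max, argmax) pair by a divide-and-conquer tournament: recursively find the best city in each half of the index range and combine with v1 >= v2 (left wins ties, preserving A's first-occurrence tie-break).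
import Mathlib
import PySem

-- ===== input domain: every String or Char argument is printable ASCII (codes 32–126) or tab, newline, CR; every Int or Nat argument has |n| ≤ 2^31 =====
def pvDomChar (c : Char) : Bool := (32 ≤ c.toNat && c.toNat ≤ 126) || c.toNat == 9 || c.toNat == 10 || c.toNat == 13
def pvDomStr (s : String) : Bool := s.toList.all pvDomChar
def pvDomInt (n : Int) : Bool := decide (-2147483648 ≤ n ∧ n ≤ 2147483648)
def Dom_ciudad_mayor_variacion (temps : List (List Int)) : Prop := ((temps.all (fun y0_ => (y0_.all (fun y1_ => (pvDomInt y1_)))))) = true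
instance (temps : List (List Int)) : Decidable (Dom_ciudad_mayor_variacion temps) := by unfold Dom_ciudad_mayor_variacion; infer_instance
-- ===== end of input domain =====

-- B replaces A's single left-to-right scan with a running (max, argmax) pair by a
-- divide-and-conquer tournament over the index range; left wins ties, so the
-- first-occurrence tie-break is preserved.

-- ===== PORT A =====
-- max(t) - min(t), shared by both ports (both Pythons literally compute it this way)
def pvF (t : List Int) : Int :=
  (PySem.List.max? t (fun x => x)).getD 0 - (PySem.List.min? t (fun x => x)).getD 0

def ciudad_mayor_variacion (temps : List (List Int)) : Int × Int :=
  -- state st = (mayor_variacion, ciudad_variacion)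
  let r := (PySem.List.pyRange 0 (temps.length : Int) 1).foldl
    (fun (st : Int × Int) i =>
      let variacion := pvF (PySem.List.pyGetD temps i [])
      if variacion > st.1 then (variacion, i) else st)
    (-1, -1)
  (r.2, r.1)

-- ===== PORT B =====
-- mejor(lo, hi): best (index, range) over temps[lo:hi], leftmost on ties.
-- Python's base case is 'hi - lo == 1'; the Lean guard 'hi - lo ≤ 1' only
-- additionally covers empty ranges, which the Python recursion never reaches
-- (it is a totalizing guard, not an algorithm switch).
def pvMejor (temps : List (List Int)) (lo hi : Int) : Int × Int :=
  if h : hi - lo ≤ 1 then (lo, pvF (PySem.List.pyGetD temps lo []))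
  else
    let mid := PySem.Int.floordiv (lo + hi) 2
    let l := pvMejor temps lo mid
    let r := pvMejor temps mid hi
    if l.2 ≥ r.2 then l else r
termination_by (hi - lo).toNat
decreasing_by
  · have h1 : lo + 1 ≤ PySem.Int.floordiv (lo + hi) 2 :=
      (PySem.Int.le_floordiv_iff_mul_le (by omega)).2 (by omega)
    have h2 : PySem.Int.floordiv (lo + hi) 2 < hi :=
      (PySem.Int.floordiv_lt_iff_lt_mul (by omega)).2 (by omega)
    omega
  · have h2 : PySem.Int.floordiv (lo + hi) 2 < hi :=
      (PySem.Int.floordiv_lt_iff_lt_mul (by omega)).2 (by omega)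
    have h1 : lo + 1 ≤ PySem.Int.floordiv (lo + hi) 2 :=
      (PySem.Int.le_floordiv_iff_mul_le (by omega)).2 (by omega)
    omega

def ciudad_mayor_variacion_alt (temps : List (List Int)) : Int × Int :=
  if temps = [] then (-1, -1)
  else pvMejor temps 0 (temps.length : Int)

-- ===== PRECONDITION & SPEC =====
-- Pre_ excludes inputs with an empty inner list, on which Python A (and B) raise ValueError from max([]).
def Pre_ciudad_mayor_variacion (temps : List (List Int)) : Prop := ∀ t ∈ temps, t ≠ []
instance (temps : List (List Int)) : Decidable (Pre_ciudad_mayor_variacion temps) := by unfold Pre_ciudad_mayor_variacion; infer_instance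
def pvWitness_ciudad_mayor_variacion : List (List Int) := [[1, 3], [2]]

def Spec_ciudad_mayor_variacion (temps : List (List Int)) (out : Int × Int) : Prop := out = ciudad_mayor_variacion_alt temps
instance (temps : List (List Int)) (out : Int × Int) : Decidable (Spec_ciudad_mayor_variacion temps out) := by unfold Spec_ciudad_mayor_variacion; infer_instance

-- ===== CLAIM (what is proved, stated in full; the proofs are below) =====
def Claim_equal_ciudad_mayor_variacion : Prop := ∀ (temps : List (List Int)), Dom_ciudad_mayor_variacion temps → Pre_ciudad_mayor_variacion temps → Spec_ciudad_mayor_variacion temps (ciudad_mayor_variacion temps)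

-- ===== LEMMAS AND PROOFS =====

-- p = (index, range): the unique "first argmax with its value" over indices [lo, hi)
def pvBest (temps : List (List Int)) (lo hi : Int) (p : Int × Int) : Prop :=
  lo ≤ p.1 ∧ p.1 < hi ∧ p.2 = pvF (PySem.List.pyGetD temps p.1 []) ∧
  (∀ j, lo ≤ j → j < hi → pvF (PySem.List.pyGetD temps j []) ≤ p.2) ∧
  (∀ j, lo ≤ j → j < p.1 → pvF (PySem.List.pyGetD temps j []) < p.2)

lemma pvBest_unique {temps : List (List Int)} {lo hi : Int} {p q : Int × Int}
    (hp : pvBest temps lo hi p) (hq : pvBest temps lo hi q) : p = q := by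
  obtain ⟨hp1, hp2, hp3, hp4, hp5⟩ := hp
  obtain ⟨hq1, hq2, hq3, hq4, hq5⟩ := hq
  have hvv : p.2 = q.2 := by
    have h1 := hq4 p.1 hp1 hp2
    have h2 := hp4 q.1 hq1 hq2
    omega
  have hii : p.1 = q.1 := by
    rcases lt_trichotomy p.1 q.1 with h | h | h
    · have := hq5 p.1 hp1 h; omega
    · exact h
    · have := hp5 q.1 hq1 h; omega
  exact Prod.ext hii hvv

lemma pvF_nonneg (t : List Int) : 0 ≤ pvF t := by
  unfold pvF
  rcases hmax : PySem.List.max? t (fun x => x) with _ | m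
  · rw [PySem.List.max?_eq_none_iff] at hmax
    subst hmax
    simp [PySem.List.min?]
  · rcases t with _ | ⟨x, t'⟩
    · simp [PySem.List.max?] at hmax
    · rcases hmin : PySem.List.min? (x :: t') (fun x => x) with _ | m'
      · rw [PySem.List.min?_eq_none_iff] at hmin; simp at hmin
      · have h1 : x ≤ m := PySem.List.max?_isMax hmax x (by simp)
        have h2 : m' ≤ x := PySem.List.min?_isMin hmin x (by simp)
        simp only [Option.getD_some]
        omega

-- B's recursion computes the first argmax of the slice
lemma pvMejor_best (temps : List (List Int)) (lo hi : Int)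
    (hlt : lo < hi) : pvBest temps lo hi (pvMejor temps lo hi) := by
  generalize hfuel : (hi - lo).toNat = fuel
  induction fuel using Nat.strong_induction_on generalizing lo hi with
  | _ fuel ih =>
    rw [pvMejor]
    by_cases h : hi - lo ≤ 1
    · rw [dif_pos h]
      refine ⟨le_refl _, hlt, rfl, ?_, ?_⟩
      · intro j hj1 hj2; have : j = lo := by omega
        subst this; exact le_refl _
      · intro j hj1 hj2; omega
    · rw [dif_neg h]
      have h1 : lo + 1 ≤ PySem.Int.floordiv (lo + hi) 2 :=
        (PySem.Int.le_floordiv_iff_mul_le (by omega)).2 (by omega)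
      have h2 : PySem.Int.floordiv (lo + hi) 2 < hi :=
        (PySem.Int.floordiv_lt_iff_lt_mul (by omega)).2 (by omega)
      set mid := PySem.Int.floordiv (lo + hi) 2 with hmid
      have hl := ih (mid - lo).toNat (by omega) lo mid (by omega) rfl
      have hr := ih (hi - mid).toNat (by omega) mid hi (by omega) rfl
      obtain ⟨hl1, hl2, hl3, hl4, hl5⟩ := hl
      obtain ⟨hr1, hr2, hr3, hr4, hr5⟩ := hr
      by_cases hv : (pvMejor temps lo mid).2 ≥ (pvMejor temps mid hi).2
      · rw [if_pos hv]
        refine ⟨hl1, by omega, hl3, ?_, ?_⟩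
        · intro j hj1 hj2
          by_cases hjm : j < mid
          · exact hl4 j hj1 hjm
          · have := hr4 j (by omega) hj2; omega
        · intro j hj1 hj2
          exact hl5 j hj1 hj2
      · rw [if_neg hv]
        push_neg at hv
        refine ⟨by omega, hr2, hr3, ?_, ?_⟩
        · intro j hj1 hj2
          by_cases hjm : j < mid
          · have := hl4 j hj1 hjm; omega
          · exact hr4 j (by omega) hj2
        · intro j hj1 hj2
          by_cases hjm : j < mid
          · have := hl4 j hj1 hjm; omega
          · exact hr5 j (by omega) hj2

-- A's fold computes the first argmax of [0, n) (state is (value, index))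
lemma foldA_best (temps : List (List Int)) (n : Int) (hn : 1 ≤ n) :
    pvBest temps 0 n
      (((PySem.List.pyRange 0 n 1).foldl
        (fun (st : Int × Int) i =>
          let variacion := pvF (PySem.List.pyGetD temps i [])
          if variacion > st.1 then (variacion, i) else st)
        (-1, -1)).2,
       ((PySem.List.pyRange 0 n 1).foldl
        (fun (st : Int × Int) i =>
          let variacion := pvF (PySem.List.pyGetD temps i [])
          if variacion > st.1 then (variacion, i) else st)
        (-1, -1)).1) := by
  obtain ⟨m, rfl⟩ : ∃ m : Nat, n = (m : Int) := ⟨n.toNat, by omega⟩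
  induction m with
  | zero => omega
  | succ k ih =>
    have hk : ((k : Int) + 1) = ((k + 1 : Nat) : Int) := by push_cast; ring
    rw [show ((k + 1 : Nat) : Int) = (k : Int) + 1 by push_cast; ring,
        PySem.List.pyRange_one_succ_right (by omega), List.foldl_append]
    rcases Nat.eq_zero_or_pos k with hk0 | hk0
    · subst hk0
      simp only [Nat.cast_zero, PySem.List.pyRange_zero, Int.toNat_zero, List.range_zero,
        List.map_nil, List.foldl_nil, List.foldl_cons]
      have hge : pvF (PySem.List.pyGetD temps 0 []) > -1 := by
        have := pvF_nonneg (PySem.List.pyGetD temps 0 []); omega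
      rw [if_pos hge]
      refine ⟨le_refl _, by omega, rfl, ?_, ?_⟩
      · intro j hj1 hj2; have : j = 0 := by omega
        subst this; exact le_refl _
      · intro j hj1 hj2; omega
    · have hbest := ih (by omega)
      set st := (PySem.List.pyRange 0 (k : Int) 1).foldl
        (fun (st : Int × Int) i =>
          let variacion := pvF (PySem.List.pyGetD temps i [])
          if variacion > st.1 then (variacion, i) else st)
        (-1, -1) with hst
      obtain ⟨hb1, hb2, hb3, hb4, hb5⟩ := hbest
      simp only [List.foldl_cons, List.foldl_nil]
      by_cases hv : pvF (PySem.List.pyGetD temps (k : Int) []) > st.1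
      · rw [if_pos hv]
        refine ⟨by omega, by omega, rfl, ?_, ?_⟩
        · intro j hj1 hj2
          by_cases hjk : j < (k : Int)
          · have := hb4 j hj1 hjk; omega
          · have : j = (k : Int) := by omega
            subst this; exact le_refl _
        · intro j hj1 hj2
          have := hb4 j hj1 (by omega); omega
      · rw [if_neg hv]
        refine ⟨hb1, by omega, hb3, ?_, ?_⟩
        · intro j hj1 hj2
          by_cases hjk : j < (k : Int)
          · exact hb4 j hj1 hjk
          · have : j = (k : Int) := by omega
            subst this; omega
        · exact hb5

-- ===== VERDICT (by name: the statement is the Claim_ definition above) =====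
theorem ciudad_mayor_variacion_spec : Claim_equal_ciudad_mayor_variacion := by
  intro temps _ _
  unfold Spec_ciudad_mayor_variacion ciudad_mayor_variacion ciudad_mayor_variacion_alt
  rcases eq_or_ne temps [] with h | h
  · subst h; simp
  · rw [if_neg h]
    have hn : 1 ≤ (temps.length : Int) := by
      have : temps.length ≠ 0 := by simpa [List.length_eq_zero_iff] using h
      omega
    have hA := foldA_best temps (temps.length : Int) hn
    have hB := pvMejor_best temps 0 (temps.length : Int) (by omega)
    have := pvBest_unique hA hB
    simp only [Prod.ext_iff] at this ⊢
    exact this
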